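-- pv_equiv track=rewrite | github.com/KeHang-Zhu/lm-automated-social-science | src/JudeaPearl/DataAnalyst.py | fix_latex_quotes
-- ===== SOURCE A (Python) =====
-- def fix_latex_quotes(latex_string):
--     """
--     Fixes the quotes in the latex string to be the correct type.
--
--     Args:
--         latex_string (str): The latex string to fix
--     """
--     fixed_latex = ""
--     n = len(latex_string)
--
--     for i, char in enumerate(latex_string):
--         if char == "'":
--             prev_char = latex_string[i - 1] if i > 0 else None
--             next_char = latex_string[i + 1] if i < n - 1 else None
--
--             # Check for apostrophe (e.g., in "don't")
--             if (
--                 prev_char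
--                 and next_char
--                 and prev_char.isalnum()
--                 and next_char.isalnum()
--             ):
--                 fixed_latex += "'"
--             # Check for opening quote
--             elif not prev_char or not prev_char.isalnum():
--                 fixed_latex += "`"
--             # Otherwise, treat as closing quote
--             else:
--                 fixed_latex += "'"
--         else:
--             fixed_latex += char
--
--     return fixed_latex
-- ===== SOURCE B (Python) =====
-- def fix_latex_quotes(latex_string):
--     """
--     Fixes the quotes in the latex string to be the correct type.
--
--     Args:
--         latex_string (str): The latex string to fix
--     """
--     # Tokenize on the quote character and rejoin: before each segment after the
--     # first, insert "`" or "'" depending on the character that preceded the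
--     # quote in the original string (tracked explicitly; "'" after an empty
--     # segment, i.e. adjacent quotes).
--     parts = latex_string.split("'")
--     out = [parts[0]]
--     prev = parts[0][-1] if parts[0] else None
--     for seg in parts[1:]:
--         out.append("'" if prev is not None and prev.isalnum() else "`")
--         out.append(seg)
--         prev = seg[-1] if seg else "'"
--     return "".join(out)
-- ===== Notes on version B (the rewrite author's own statement) =====
-- stated objective: faster
-- what changed: Replaces A's indexed char-by-char scan (with prev/next lookups and += string concatenation) by a tokenize-and-rejoin pass: split the string on the quote character, walk the segments inserting a backtick or apostrophe before each one based on an explicitly tracked previous original character, and join once.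
import Mathlib
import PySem

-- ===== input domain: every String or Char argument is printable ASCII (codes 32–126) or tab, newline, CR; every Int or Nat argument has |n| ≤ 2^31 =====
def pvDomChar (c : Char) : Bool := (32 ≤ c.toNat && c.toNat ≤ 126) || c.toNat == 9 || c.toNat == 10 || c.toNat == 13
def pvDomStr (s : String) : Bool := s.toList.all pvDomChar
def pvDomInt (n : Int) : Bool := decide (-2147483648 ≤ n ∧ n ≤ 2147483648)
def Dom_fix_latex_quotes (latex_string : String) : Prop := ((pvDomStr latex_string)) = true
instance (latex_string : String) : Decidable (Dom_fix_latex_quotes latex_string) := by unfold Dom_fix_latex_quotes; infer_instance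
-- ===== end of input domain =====

-- B replaces A's indexed char-by-char scan (prev/next lookups, three branches) by a
-- tokenize-and-rejoin pass: split on the quote character, insert ` or ' before each
-- later segment from an explicitly tracked previous original character, and join.

-- ===== PORT A =====
-- loop body of A's `for i, char in enumerate(latex_string)` (cs = list of the string, n = its length)
def fixStepA (cs : List Char) (n : Int) (acc : List Char) (p : Int × Char) : List Char :=
  let i := p.1
  let char := p.2
  if char = '\'' then
    let prev_char : Option Char := if i > 0 then PySem.List.pyGet? cs (i - 1) else none
    let next_char : Option Char := if i < n - 1 then PySem.List.pyGet? cs (i + 1) else none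
    if prev_char.isSome && next_char.isSome
        && (match prev_char with | some c => PySem.Chars.isalnum c | none => false)
        && (match next_char with | some c => PySem.Chars.isalnum c | none => false) then
      acc ++ ['\'']
    else if !prev_char.isSome || !(match prev_char with | some c => PySem.Chars.isalnum c | none => false) then
      acc ++ ['`']
    else
      acc ++ ['\'']
  else
    acc ++ [char]

def fix_latex_quotes (latex_string : String) : String :=
  String.mk ((PySem.List.enumerate latex_string.toList).foldl
    (fixStepA latex_string.toList (latex_string.toList.length : Int)) [])

-- ===== PORT B =====
-- loop body of B's `for seg in parts[1:]` : state = (out, prev)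
def fixFoldB (st : List (List Char) × Option Char) (seg : List Char) : List (List Char) × Option Char :=
  (st.1 ++ [[if (match st.2 with | some p => PySem.Chars.isalnum p | none => false) then '\'' else '`'], seg],
   if seg = [] then some '\'' else seg.getLast?)

def fix_latex_quotes_alt (latex_string : String) : String :=
  match PySem.Chars.splitOn latex_string.toList ['\''] with
  | [] => String.mk []      -- unreachable: split always yields at least one piece
  | p0 :: rest =>
      String.mk (PySem.Chars.join []
        ((rest.foldl fixFoldB ([p0], if p0 = [] then none else p0.getLast?)).1))

-- ===== PRECONDITION & SPEC =====
def Spec_fix_latex_quotes (latex_string : String) (out : String) : Prop := out = fix_latex_quotes_alt latex_string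
instance (latex_string : String) (out : String) : Decidable (Spec_fix_latex_quotes latex_string out) := by unfold Spec_fix_latex_quotes; infer_instance

-- ===== CLAIM (what is proved, stated in full; the proofs are below) =====
def Claim_equal_fix_latex_quotes : Prop := ∀ (latex_string : String), Dom_fix_latex_quotes latex_string → Spec_fix_latex_quotes latex_string (fix_latex_quotes latex_string)

-- ===== LEMMAS AND PROOFS =====

def prevAlnum : Option Char → Bool
  | some p => PySem.Chars.isalnum p
  | none => false

-- canonical result: each char depends only on its predecessor
def quoteSpec : Option Char → List Char → List Char
  | _, [] => []
  | prev, c :: rest =>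
      (if c = '\'' then (if prevAlnum prev then '\'' else '`') else c) :: quoteSpec (some c) rest

-- ---- A-side: the indexed fold computes quoteSpec ----

lemma stepA_eq (pre rest : List Char) (c : Char) (acc : List Char) :
    fixStepA (pre ++ c :: rest) ((pre ++ c :: rest).length : Int) acc ((pre.length : Int), c)
      = acc ++ [if c = '\'' then (if prevAlnum pre.getLast? then '\'' else '`') else c] := by
  by_cases hc : c = '\''
  · subst hc
    simp only [fixStepA, if_true]
    have hprev : (if (pre.length : Int) > 0 then PySem.List.pyGet? (pre ++ '\'' :: rest) ((pre.length : Int) - 1) else none) = pre.getLast? := by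
      cases pre with
      | nil => simp
      | cons p0 ps =>
          have hpos : ((p0 :: ps).length : Int) > 0 := by exact_mod_cast Nat.succ_pos ps.length
          rw [if_pos hpos]
          have h1 : ((p0 :: ps).length : Int) - 1 = (((p0 :: ps).length - 1 : Nat) : Int) := by
            push_cast [List.length_cons]; omega
          rw [h1, PySem.List.pyGet?_natCast,
            List.getElem?_append_left (by simp), ← List.getLast?_eq_getElem?]
    rw [hprev]
    cases hx : pre.getLast? with
    | none =>
        simp [prevAlnum]
    | some pl =>
        cases hal : PySem.Chars.isalnum pl with
        | false =>
            cases (if ((pre.length : Int)) < (((pre ++ '\'' :: rest).length : Int)) - 1 then PySem.List.pyGet? (pre ++ '\'' :: rest) ((pre.length : Int) + 1) else none) with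
            | none => simp [prevAlnum, hal]
            | some nc => simp [prevAlnum, hal]
        | true =>
            cases (if ((pre.length : Int)) < (((pre ++ '\'' :: rest).length : Int)) - 1 then PySem.List.pyGet? (pre ++ '\'' :: rest) ((pre.length : Int) + 1) else none) with
            | none => simp [prevAlnum, hal]
            | some nc => cases hn : PySem.Chars.isalnum nc <;> simp [prevAlnum, hal, hn]
  · simp [fixStepA, hc]

lemma a_fold_eq (cs : List Char) : ∀ (suf pre acc : List Char), cs = pre ++ suf →
    (PySem.List.enumerate suf (pre.length : Int)).foldl (fixStepA cs (cs.length : Int)) acc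
      = acc ++ quoteSpec pre.getLast? suf := by
  intro suf
  induction suf with
  | nil => intro pre acc h; simp [PySem.List.enumerate, quoteSpec]
  | cons c rest ih =>
      intro pre acc h
      have henum : PySem.List.enumerate (c :: rest) ((pre.length : Int))
          = ((pre.length : Int), c) :: PySem.List.enumerate rest ((pre.length : Int) + 1) := by
        simp [PySem.List.enumerate]
      rw [henum, List.foldl_cons]
      have hstep := stepA_eq pre rest c acc
      rw [← h] at hstep
      rw [hstep]
      have hlen : ((pre ++ [c]).length : Int) = (pre.length : Int) + 1 := by simp
      have := ih (pre ++ [c]) (acc ++ [if c = '\'' then (if prevAlnum pre.getLast? then '\'' else '`') else c]) (by rw [h]; simp)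
      rw [hlen] at this
      rw [this, List.getLast?_concat]
      simp [quoteSpec]

-- ---- B-side: splitting on the quote character ----

-- recursive characterisation of cs.split("'")
def splitQ : List Char → List (List Char)
  | [] => [[]]
  | c :: rest => if c = '\'' then [] :: splitQ rest else (splitQ rest).modifyHead (c :: ·)

lemma splitQ_ne_nil (cs : List Char) : splitQ cs ≠ [] := by
  cases cs with
  | nil => simp [splitQ]
  | cons c rest =>
      by_cases hc : c = '\''
      · simp [splitQ, hc]
      · simp only [splitQ, if_neg hc]
        cases h : splitQ rest with
        | nil => exact absurd h (splitQ_ne_nil rest)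
        | cons a t => simp

lemma go_splitQ : ∀ (fuel : Nat) (cs cur : List Char) (acc : List (List Char)), cs.length ≤ fuel →
    PySem.Chars.splitOn.go ['\''] fuel cs cur acc
      = acc.reverse ++ (splitQ cs).modifyHead (cur.reverse ++ ·) := by
  intro fuel
  induction fuel with
  | zero =>
      intro cs cur acc h
      have : cs = [] := List.eq_nil_of_length_eq_zero (Nat.le_zero.mp h)
      subst this
      rw [PySem.Chars.splitOn.go.eq_def]
      simp [splitQ]
  | succ f ih =>
      intro cs cur acc h
      cases cs with
      | nil =>
          rw [PySem.Chars.splitOn.go.eq_def]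
          simp [splitQ]
      | cons c rest =>
          have hstep : PySem.Chars.splitOn.go ['\''] (f+1) (c :: rest) cur acc
              = if List.isPrefixOf ['\''] (c :: rest)
                then PySem.Chars.splitOn.go ['\''] f (List.drop (['\''] : List Char).length (c :: rest)) [] (cur.reverse :: acc)
                else PySem.Chars.splitOn.go ['\''] f rest (c :: cur) acc := by
            rw [PySem.Chars.splitOn.go.eq_def]
          rw [hstep]
          by_cases hc : c = '\''
          · subst hc
            rw [if_pos (by simp [List.isPrefixOf])]
            rw [show List.drop (['\''] : List Char).length ('\'' :: rest) = rest by simp]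
            rw [ih rest [] (cur.reverse :: acc) (by simpa using Nat.le_of_succ_le_succ h)]
            simp only [splitQ, List.reverse_cons, List.reverse_nil, List.nil_append]
            cases hs : splitQ rest with
            | nil => exact absurd hs (splitQ_ne_nil rest)
            | cons a t => simp
          · rw [if_neg (by simp [List.isPrefixOf]; exact fun h => hc h.symm)]
            rw [ih rest (c :: cur) acc (by simpa using Nat.le_of_succ_le_succ h)]
            simp only [splitQ, if_neg hc]
            cases hs : splitQ rest with
            | nil => exact absurd hs (splitQ_ne_nil rest)
            | cons a t => simp

lemma splitOn_eq_splitQ (cs : List Char) :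
    PySem.Chars.splitOn cs ['\''] = splitQ cs := by
  rw [PySem.Chars.splitOn, go_splitQ (cs.length + 1) cs [] [] (Nat.le_succ _)]
  cases hs : splitQ cs with
  | nil => exact absurd hs (splitQ_ne_nil cs)
  | cons a t => simp

-- the character B tracks after consuming a segment
def nextPrev (seg : List Char) : Option Char := if seg = [] then some '\'' else seg.getLast?

-- the flat text B emits for the segments after the first
def segsOut : Option Char → List (List Char) → List Char
  | _, [] => []
  | prev, seg :: rest => (if prevAlnum prev then '\'' else '`') :: (seg ++ segsOut (nextPrev seg) rest)

lemma foldB_flatten : ∀ (segs : List (List Char)) (out : List (List Char)) (prev : Option Char),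
    ((segs.foldl fixFoldB (out, prev)).1).flatten = out.flatten ++ segsOut prev segs := by
  intro segs
  induction segs with
  | nil => intro out prev; simp [segsOut]
  | cons seg rest ih =>
      intro out prev
      rw [List.foldl_cons]
      show ((rest.foldl fixFoldB (out ++ [_, seg], if seg = [] then some '\'' else seg.getLast?)).1).flatten = _
      rw [ih]
      cases prev with
      | none => simp [segsOut, prevAlnum, nextPrev]
      | some p => cases hp : PySem.Chars.isalnum p <;> simp [segsOut, prevAlnum, nextPrev, hp]

lemma quoteSpec_eq_splitQ : ∀ (cs : List Char) (prev : Option Char),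
    quoteSpec prev cs
      = match splitQ cs with
        | [] => []
        | p0 :: rest => p0 ++ segsOut (if p0 = [] then prev else p0.getLast?) rest := by
  intro cs
  induction cs with
  | nil => intro prev; simp [splitQ, quoteSpec, segsOut]
  | cons c rest ih =>
      intro prev
      by_cases hc : c = '\''
      · subst hc
        simp only [splitQ, quoteSpec]
        cases hs : splitQ rest with
        | nil => exact absurd hs (splitQ_ne_nil rest)
        | cons p0 t =>
            have := ih (some '\'')
            rw [hs] at this
            rw [this]
            simp [prevAlnum, nextPrev, segsOut]
      · simp only [splitQ, if_neg hc, quoteSpec]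
        cases hs : splitQ rest with
        | nil => exact absurd hs (splitQ_ne_nil rest)
        | cons p0 t =>
            have := ih (some c)
            rw [hs] at this
            simp only [List.modifyHead]
            rw [this]
            cases hp : p0 with
            | nil => simp
            | cons x xs => simp [List.getLast?_cons_cons]

lemma join_nil_flatten (ps : List (List Char)) : PySem.Chars.join [] ps = ps.flatten := by
  induction ps with
  | nil => rfl
  | cons a t ih =>
      cases t with
      | nil => simp [PySem.Chars.join, List.intercalate, List.intersperse]
      | cons b u => rw [PySem.Chars.join_cons_cons] at *; simp_all

-- ===== VERDICT (by name: the statement is the Claim_ definition above) =====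
theorem fix_latex_quotes_spec : Claim_equal_fix_latex_quotes := by
  intro s _
  unfold Spec_fix_latex_quotes fix_latex_quotes fix_latex_quotes_alt
  have ha := a_fold_eq s.toList s.toList [] [] (by simp)
  simp only [List.length_nil, Nat.cast_zero, List.nil_append, List.getLast?_nil] at ha
  rw [ha, splitOn_eq_splitQ]
  have hq := quoteSpec_eq_splitQ s.toList none
  cases hs : splitQ s.toList with
  | nil => exact absurd hs (splitQ_ne_nil s.toList)
  | cons p0 rest =>
      rw [hs] at hq
      simp only [] at hq ⊢
      rw [hq, join_nil_flatten, foldB_flatten]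
      simp
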